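-- pv_equiv track=rewrite | github.com/rossbrandon/advent-of-code | 2025/python/day-03/main.py | get_highest_joltage_part_1
-- ===== SOURCE A (Python) =====
-- def get_highest_joltage_part_1(digits: list[int]) -> int:
--     max_seen = 0
--     highest_joltage = 0
--     for i in range(len(digits) - 1, -1, -1):
--         d = digits[i]
--         candidate = d * 10 + max_seen
--         if i != len(digits) - 1 and candidate > highest_joltage:
--             highest_joltage = candidate
--         if d > max_seen:
--             max_seen = d
--     return highest_joltage
-- ===== SOURCE B (Python) =====
-- def get_highest_joltage_part_1(digits: list[int]) -> int:
--     # backward pass: suffix[i] = max(0, max of digits strictly to the right of i)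
--     suffix = []
--     m = 0
--     for d in reversed(digits):
--         suffix.append(m)
--         if d > m:
--             m = d
--     suffix.reverse()
--     # forward pass over all positions except the last
--     result = 0
--     for d, s in zip(digits[:-1], suffix):
--         c = d * 10 + s
--         if c > result:
--             result = c
--     return result
-- ===== Notes on version B (the rewrite author's own statement) =====
-- stated objective: alternative
-- what changed: Replaces the single fused right-to-left loop carrying (max_seen, highest) with two separate passes: a backward pass that materialises a suffix-maximum table, then an independent forward pass over digits[:-1] maximising d*10+suffix[i].
import Mathlib
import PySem

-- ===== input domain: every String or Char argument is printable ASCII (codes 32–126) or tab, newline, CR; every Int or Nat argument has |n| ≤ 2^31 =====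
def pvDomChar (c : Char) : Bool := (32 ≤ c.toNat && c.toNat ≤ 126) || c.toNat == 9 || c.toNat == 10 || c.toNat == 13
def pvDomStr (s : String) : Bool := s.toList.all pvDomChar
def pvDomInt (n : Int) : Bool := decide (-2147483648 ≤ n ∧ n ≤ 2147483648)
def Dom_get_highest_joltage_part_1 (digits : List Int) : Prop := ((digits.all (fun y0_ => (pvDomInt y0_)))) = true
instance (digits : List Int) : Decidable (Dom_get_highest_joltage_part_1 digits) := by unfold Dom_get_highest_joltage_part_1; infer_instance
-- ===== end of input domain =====

-- B replaces A's fused right-to-left loop with a precomputed suffix-maximum table plus a separate forward pass (alternative decomposition, same cost).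


-- ===== PORT A =====
-- literal port of A's descending index loop; digits[i] is ported with pyGetD
-- (the loop index i is always in range, so Python never raises here)
def get_highest_joltage_part_1 (digits : List Int) : Int :=
  (List.foldl
    (fun (st : Int × Int) (i : Int) =>
      let d := PySem.List.pyGetD digits i 0
      let candidate := d * 10 + st.1
      let highest := if i ≠ (digits.length : Int) - 1 ∧ candidate > st.2 then candidate else st.2
      let maxSeen := if d > st.1 then d else st.1
      (maxSeen, highest))
    (0, 0)
    (PySem.List.pyRange ((digits.length : Int) - 1) (-1) (-1))).2

-- ===== PORT B =====
-- literal port of B: backward pass building the suffix-max table, then a forward pass over digits[:-1]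
def get_highest_joltage_part_1_alt (digits : List Int) : Int :=
  let p := digits.reverse.foldl
    (fun (st : List Int × Int) (d : Int) =>
      (st.1 ++ [st.2], if d > st.2 then d else st.2)) ([], 0)
  let suffix := p.1.reverse
  let pairs := (PySem.List.slice digits none (some (-1))).zip suffix
  pairs.foldl
    (fun (result : Int) (ds : Int × Int) =>
      let c := ds.1 * 10 + ds.2
      if c > result then c else result) 0

-- ===== PRECONDITION & SPEC =====
def Spec_get_highest_joltage_part_1 (digits : List Int) (out : Int) : Prop := out = get_highest_joltage_part_1_alt digits
instance (digits : List Int) (out : Int) : Decidable (Spec_get_highest_joltage_part_1 digits out) := by unfold Spec_get_highest_joltage_part_1; infer_instance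

-- ===== CLAIM (what is proved, stated in full; the proofs are below) =====
def Claim_equal_get_highest_joltage_part_1 : Prop := ∀ (digits : List Int), Dom_get_highest_joltage_part_1 digits → Spec_get_highest_joltage_part_1 digits (get_highest_joltage_part_1 digits)

-- ===== LEMMAS AND PROOFS =====

-- A's loop body, named for the proofs
def stepA (digits : List Int) (st : Int × Int) (i : Int) : Int × Int :=
  let d := PySem.List.pyGetD digits i 0
  let candidate := d * 10 + st.1
  let highest := if i ≠ (digits.length : Int) - 1 ∧ candidate > st.2 then candidate else st.2
  let maxSeen := if d > st.1 then d else st.1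
  (maxSeen, highest)

-- structural characterisation of A's state: (max_seen, highest_joltage)
def loopC : List Int → Int × Int
  | [] => (0, 0)
  | d :: rest =>
    let p := loopC rest
    (if d > p.1 then d else p.1,
     if rest ≠ [] ∧ d * 10 + p.1 > p.2 then d * 10 + p.1 else p.2)

-- B's backward pass, named
def backF (digits : List Int) : List Int × Int :=
  digits.reverse.foldl
    (fun (st : List Int × Int) (d : Int) =>
      (st.1 ++ [st.2], if d > st.2 then d else st.2)) ([], 0)

-- B's suffix table, characterised structurally
def suffL : List Int → List Int
  | [] => []
  | _ :: rest => (loopC rest).1 :: suffL rest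

-- B's forward-pass body, named
def mstep (r : Int) (p : Int × Int) : Int :=
  if p.1 * 10 + p.2 > r then p.1 * 10 + p.2 else r

theorem shift_stepA (d : Int) (rest : List Int) (st : Int × Int) (k : Nat) :
    stepA (d :: rest) st ((k : Int) + 1) = stepA rest st (k : Int) := by
  unfold stepA
  have h1 : PySem.List.pyGetD (d :: rest) ((k : Int) + 1) 0 = PySem.List.pyGetD rest (k : Int) 0 := by
    have hc : ((k : Int) + 1) = ((k + 1 : Nat) : Int) := by push_cast; ring
    rw [hc, PySem.List.pyGetD_natCast, PySem.List.pyGetD_natCast]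
    simp [List.getD]
  have h2 : (((k : Int) + 1) ≠ ((d :: rest).length : Int) - 1) ↔ ((k : Int) ≠ (rest.length : Int) - 1) := by
    simp only [List.length_cons]
    push_cast
    omega
  rw [h1]
  simp only [h2]

theorem foldr_range_eq_loopC (digits : List Int) :
    List.foldr (fun (k : Nat) st => stepA digits st (k : Int)) (0, 0) (List.range digits.length)
      = loopC digits := by
  induction digits with
  | nil => simp [loopC]
  | cons d rest ih =>
    rw [List.length_cons, List.range_succ_eq_map, List.foldr_cons, List.foldr_map]
    have hfun : (fun (x : Nat) (y : Int × Int) => stepA (d :: rest) y ((x.succ : Nat) : Int))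
        = fun (x : Nat) (y : Int × Int) => stepA rest y (x : Int) := by
      funext k st
      have hc : ((k.succ : Nat) : Int) = (k : Int) + 1 := by push_cast; ring
      rw [hc, shift_stepA]
    rw [hfun, ih]
    have hd : PySem.List.pyGetD (d :: rest) ((0 : Nat) : Int) 0 = d := by
      rw [PySem.List.pyGetD_natCast]; rfl
    have hflag : (((0 : Nat) : Int) ≠ ((d :: rest).length : Int) - 1) ↔ rest ≠ [] := by
      simp only [List.length_cons, ne_eq, ← List.length_eq_zero_iff]
      push_cast
      omega
    conv_rhs => rw [loopC]
    unfold stepA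
    simp only [hd, hflag]

theorem portA_eq_loopC (digits : List Int) :
    get_highest_joltage_part_1 digits = (loopC digits).2 := by
  have h0 : get_highest_joltage_part_1 digits
      = (List.foldl (stepA digits) (0, 0)
          (PySem.List.pyRange ((digits.length : Int) - 1) (-1) (-1))).2 := rfl
  have hr : PySem.List.pyRange ((digits.length : Int) - 1) (-1) (-1)
      = (PySem.List.pyRange 0 (digits.length : Int) 1).reverse := by
    have h := PySem.List.pyRange_neg_one_eq_reverse ((digits.length : Int) - 1) (-1)
    simpa using h
  have hpy : PySem.List.pyRange 0 (digits.length : Int) 1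
      = (List.range digits.length).map (fun (k : Nat) => (k : Int)) := by
    rw [PySem.List.pyRange_one]
    have ht : ((digits.length : Int) - 0).toNat = digits.length := by omega
    rw [ht]
    exact List.map_congr_left (fun k _ => by ring)
  rw [h0, hr, hpy, List.foldl_reverse, List.foldr_map, foldr_range_eq_loopC]

theorem backF_cons (d : Int) (rest : List Int) :
    backF (d :: rest) = ((backF rest).1 ++ [(backF rest).2],
      if d > (backF rest).2 then d else (backF rest).2) := by
  unfold backF
  rw [List.reverse_cons, List.foldl_append]
  rfl

theorem backF_snd (digits : List Int) : (backF digits).2 = (loopC digits).1 := by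
  induction digits with
  | nil => rfl
  | cons d rest ih => rw [backF_cons, loopC]; simp [ih]

theorem backF_fst_reverse (digits : List Int) : (backF digits).1.reverse = suffL digits := by
  induction digits with
  | nil => rfl
  | cons d rest ih =>
    rw [backF_cons, suffL]
    simp [ih, backF_snd]

theorem mstep_comm (r : Int) (p q : Int × Int) :
    mstep (mstep r p) q = mstep (mstep r q) p := by
  unfold mstep; split_ifs <;> omega

theorem foldl_mstep_swap (Z : List (Int × Int)) (r : Int) (p : Int × Int) :
    List.foldl mstep (mstep r p) Z = mstep (List.foldl mstep r Z) p := by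
  induction Z generalizing r with
  | nil => rfl
  | cons z Z ih =>
    rw [List.foldl_cons, List.foldl_cons, mstep_comm, ih]

theorem foldl_pairs_eq_loopC (digits : List Int) :
    List.foldl mstep 0 (digits.dropLast.zip (suffL digits)) = (loopC digits).2 := by
  induction digits with
  | nil => rfl
  | cons d rest ih =>
    cases rest with
    | nil => rfl
    | cons e t =>
      have hz : ((d :: e :: t).dropLast).zip (suffL (d :: e :: t))
          = (d, (loopC (e :: t)).1) :: ((e :: t).dropLast).zip (suffL (e :: t)) := by
        simp [suffL, List.dropLast]
      rw [hz, List.foldl_cons, foldl_mstep_swap, ih]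
      have hrhs : (loopC (d :: e :: t)).2 = mstep (loopC (e :: t)).2 (d, (loopC (e :: t)).1) := by
        conv_lhs => rw [loopC]
        simp [mstep]
      rw [hrhs]

theorem portB_eq_loopC (digits : List Int) :
    get_highest_joltage_part_1_alt digits = (loopC digits).2 := by
  unfold get_highest_joltage_part_1_alt
  have hslice : PySem.List.slice digits none (some (-1)) = digits.dropLast :=
    PySem.List.slice_to_neg_one digits
  have hsuffix : (digits.reverse.foldl
      (fun (st : List Int × Int) (d : Int) =>
        (st.1 ++ [st.2], if d > st.2 then d else st.2)) ([], 0)).1.reverse = suffL digits :=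
    backF_fst_reverse digits
  simp only [hslice, hsuffix]
  have hm : (fun (result : Int) (ds : Int × Int) =>
      let c := ds.1 * 10 + ds.2
      if c > result then c else result) = mstep := by
    funext r p; simp [mstep]
  rw [hm, foldl_pairs_eq_loopC]

-- ===== VERDICT (by name: the statement is the Claim_ definition above) =====
theorem get_highest_joltage_part_1_spec : Claim_equal_get_highest_joltage_part_1 := by
  intro digits _
  unfold Spec_get_highest_joltage_part_1
  rw [portA_eq_loopC, portB_eq_loopC]
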